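-- pv_equiv track=rewrite | github.com/CoryPearl/calc | src/app.py | _rewrite_abs
-- ===== SOURCE A (Python) =====
-- def _rewrite_abs(expr: str) -> str:
--     """
--     Convert |x-3| into Abs(x-3). Handles absolute values.
--     Simple pairing: each | alternates between opening and closing Abs.
--     For ||x|| (nested), treat as Abs(Abs(x)).
--     """
--     out = []
--     i = 0
--     n = len(expr)
--     # Simple state: True = inside Abs, False = outside
--     inside_abs = False
--
--     while i < n:
--         ch = expr[i]
--         if ch == "|":
--             if not inside_abs:
--                 # Opening bar
--                 out.append("Abs(")
--                 inside_abs = True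
--             else:
--                 # Closing bar
--                 out.append(")")
--                 inside_abs = False
--         else:
--             out.append(ch)
--         i += 1
--
--     # Close any unmatched opening bars
--     if inside_abs:
--         out.append(")")
--
--     return "".join(out)
-- ===== SOURCE B (Python) =====
-- def _rewrite_abs(expr: str) -> str:
--     """Split on '|' and rejoin the segments with alternating 'Abs(' / ')' separators;
--     an odd number of bars (even number of parts) leaves one opener unmatched, close it."""
--     parts = expr.split("|")
--     pieces = [parts[0]]
--     for k, p in enumerate(parts[1:]):
--         pieces.append("Abs(" if k % 2 == 0 else ")")
--         pieces.append(p)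
--     if len(parts) % 2 == 0:
--         pieces.append(")")
--     return "".join(pieces)
-- ===== Notes on version B (the rewrite author's own statement) =====
-- stated objective: simpler
-- what changed: Replaces the character-by-character boolean state machine that appends each character separately with a single split('|') followed by rejoining the segments with alternating 'Abs(' / ')' separators (closing a final unmatched opener by the parity of the part count); bulk split/join avoids the per-character list appends.
import Mathlib
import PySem

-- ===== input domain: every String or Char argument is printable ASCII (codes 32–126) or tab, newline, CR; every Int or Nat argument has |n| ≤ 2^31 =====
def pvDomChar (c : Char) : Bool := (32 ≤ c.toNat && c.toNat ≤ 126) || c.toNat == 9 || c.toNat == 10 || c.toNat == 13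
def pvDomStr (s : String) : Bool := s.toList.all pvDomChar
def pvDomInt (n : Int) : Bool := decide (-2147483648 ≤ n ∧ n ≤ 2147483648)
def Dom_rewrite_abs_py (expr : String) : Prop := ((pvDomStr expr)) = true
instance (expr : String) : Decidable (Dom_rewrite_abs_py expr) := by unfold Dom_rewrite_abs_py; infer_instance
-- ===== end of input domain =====

-- B replaces A's char-by-char boolean state machine by split('|') + rejoin with alternating separators (objective: simpler).

-- ===== PORT A =====
-- A: scan the characters left to right, keeping the list `out` of emitted pieces and the
-- `inside_abs` flag; each '|' alternately emits "Abs(" or ")"; close an unmatched opener at the end.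
def rewrite_abs_py (expr : String) : String :=
  let st := expr.toList.foldl
    (fun (st : List String × Bool) ch =>
      if ch = '|' then
        if st.2 = false then (st.1 ++ ["Abs("], true) else (st.1 ++ [")"], false)
      else (st.1 ++ [ch.toString], st.2))
    ([], false)
  let out := if st.2 then st.1 ++ [")"] else st.1
  PySem.Str.join "" out

-- ===== PORT B =====
-- B: parts = expr.split("|") (sep "|" is nonempty, so Python's split = Chars.splitOn);
-- rejoin with alternating separators "Abs(" (even k) / ")" (odd k); append ")" iff len(parts) is even.
def rewrite_abs_py_alt (expr : String) : String :=
  let parts := (PySem.Chars.splitOn expr.toList "|".toList).map String.ofList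
  let pieces := (PySem.List.enumerate (parts.drop 1)).foldl
    (fun (acc : List String) kp =>
      acc ++ [if kp.1 % 2 == 0 then "Abs(" else ")", kp.2])
    [parts.headD ""]
  let pieces := if parts.length % 2 == 0 then pieces ++ [")"] else pieces
  PySem.Str.join "" pieces

-- ===== PRECONDITION & SPEC =====
def Spec_rewrite_abs_py (expr : String) (out : String) : Prop := out = rewrite_abs_py_alt expr
instance (expr : String) (out : String) : Decidable (Spec_rewrite_abs_py expr out) := by unfold Spec_rewrite_abs_py; infer_instance

-- ===== CLAIM (what is proved, stated in full; the proofs are below) =====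
def Claim_equal_rewrite_abs_py : Prop := ∀ (expr : String), Dom_rewrite_abs_py expr → Spec_rewrite_abs_py expr (rewrite_abs_py expr)

-- ===== LEMMAS AND PROOFS =====

-- Structural recursion equivalent of Chars.splitOn with the one-char separator '|'.
def splitBar : List Char → List (List Char)
  | [] => [[]]
  | c :: t => if c = '|' then [] :: splitBar t else (splitBar t).modifyHead (c :: ·)

theorem splitBar_ne_nil (l : List Char) : splitBar l ≠ [] := by
  induction l with
  | nil => simp [splitBar]
  | cons c t ih =>
    simp only [splitBar]
    split_ifs
    · simp
    · cases h : splitBar t with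
      | nil => exact absurd h ih
      | cons p ps => simp [List.modifyHead]

theorem splitOn_go_bar (l : List Char) : ∀ (fuel : Nat), l.length ≤ fuel →
    ∀ (cur : List Char) (acc : List (List Char)),
    PySem.Chars.splitOn.go ['|'] (fuel + 1) l cur acc
      = acc.reverse ++ (splitBar l).modifyHead (cur.reverse ++ ·) := by
  induction l with
  | nil =>
    intro fuel _ cur acc
    rw [PySem.Chars.splitOn.go.eq_def]
    simp [splitBar]
  | cons c t ih =>
    intro fuel hf cur acc
    simp only [List.length_cons] at hf
    obtain ⟨g, rfl⟩ : ∃ g, fuel = g + 1 := ⟨fuel - 1, by omega⟩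
    rw [PySem.Chars.splitOn.go.eq_def]
    simp only []
    by_cases hc : c = '|'
    · subst hc
      have hpre : (['|'] : List Char).isPrefixOf ('|' :: t) = true := by
        simp [List.isPrefixOf]
      simp only [hpre, if_true, List.length_cons, List.drop_succ_cons, List.length_nil,
        List.drop_zero]
      rw [ih g (by omega) [] (cur.reverse :: acc)]
      cases h : splitBar t with
      | nil => exact absurd h (splitBar_ne_nil t)
      | cons p ps => simp [splitBar, h, List.modifyHead]
    · have hpre : (['|'] : List Char).isPrefixOf (c :: t) = false := by
        simp only [List.isPrefixOf, List.isPrefixOf_nil_left, Bool.and_true, beq_eq_false_iff_ne]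
        exact fun h => hc h.symm
      simp only [hpre, if_false]
      rw [ih g (by omega) (c :: cur) acc]
      simp only [splitBar, hc, if_false]
      obtain ⟨p, ps, hps⟩ : ∃ p ps, splitBar t = p :: ps := by
        cases h : splitBar t with
        | nil => exact absurd h (splitBar_ne_nil t)
        | cons p ps => exact ⟨p, ps, rfl⟩
      simp [hps, List.modifyHead]

theorem splitOn_bar (l : List Char) :
    PySem.Chars.splitOn l ['|'] = splitBar l := by
  unfold PySem.Chars.splitOn
  rw [splitOn_go_bar l l.length (le_refl _) [] []]
  cases h : splitBar l with
  | nil => exact absurd h (splitBar_ne_nil l)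
  | cons p ps => simp [List.modifyHead]

-- Recursive description of A's remaining output given the current `inside_abs` flag.
def loopA : List Char → Bool → List Char
  | [], b => if b then [')'] else []
  | c :: t, b =>
      if c = '|' then (if b then [')'] else "Abs(".toList) ++ loopA t (!b)
      else c :: loopA t b

-- The glue between the split segments: alternating "Abs(" / ")" with a final ')' if the flag is set.
def glue : List (List Char) → Bool → List Char
  | [], b => if b then [')'] else []
  | p :: ps, b => (if b then [')'] else "Abs(".toList) ++ p ++ glue ps (!b)

theorem loopA_eq_glue (l : List Char) : ∀ b : Bool,
    loopA l b = (splitBar l).headD [] ++ glue ((splitBar l).tail) b := by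
  induction l with
  | nil => intro b; simp [loopA, splitBar, glue]
  | cons c t ih =>
    intro b
    by_cases hc : c = '|'
    · subst hc
      simp only [loopA, splitBar, if_true, List.headD, List.tail]
      obtain ⟨p, ps, hps⟩ : ∃ p ps, splitBar t = p :: ps := by
        cases h : splitBar t with
        | nil => exact absurd h (splitBar_ne_nil t)
        | cons p ps => exact ⟨p, ps, rfl⟩
      rw [ih (!b)]
      simp [hps, glue]
    · simp only [loopA, splitBar, hc, if_false]
      obtain ⟨p, ps, hps⟩ : ∃ p ps, splitBar t = p :: ps := by
        cases h : splitBar t with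
        | nil => exact absurd h (splitBar_ne_nil t)
        | cons p ps => exact ⟨p, ps, rfl⟩
      rw [ih b]
      simp [hps, List.modifyHead]

-- A's foldl, joined, equals loopA.
theorem flatten_intersperse_nil (l : List (List Char)) :
    (List.intersperse ([] : List Char) l).flatten = l.flatten := by
  induction l with
  | nil => simp
  | cons a t ih => cases t <;> simp_all [List.intersperse]

theorem joinStrs_eq (out : List String) :
    (PySem.Str.join "" out).toList = (out.map String.toList).flatten := by
  simp [PySem.Str.join, PySem.Chars.join, List.intercalate, flatten_intersperse_nil]

theorem a_fold_eq (l : List Char) : ∀ (out : List String) (b : Bool),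
    (let st := l.foldl
      (fun (st : List String × Bool) ch =>
        if ch = '|' then
          if st.2 = false then (st.1 ++ ["Abs("], true) else (st.1 ++ [")"], false)
        else (st.1 ++ [ch.toString], st.2)) (out, b)
     ((if st.2 then st.1 ++ [")"] else st.1).map String.toList).flatten)
      = (out.map String.toList).flatten ++ loopA l b := by
  induction l with
  | nil =>
    intro out b
    cases b <;> simp [loopA]
  | cons c t ih =>
    intro out b
    by_cases hc : c = '|'
    · subst hc
      cases b <;>
        simp only [List.foldl_cons, if_true, if_false, reduceIte] <;>
        rw [ih] <;> simp [loopA]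
    · simp only [List.foldl_cons, hc, if_false, reduceIte]
      rw [ih]
      simp [loopA, hc, Char.toString]

-- B's foldl, joined, equals head ++ glue, for any start index (parity ↔ flag).
theorem b_fold_eq (ps : List String) : ∀ (k : Int) (acc : List String),
    ((((PySem.List.enumerate ps k).foldl
        (fun (acc : List String) kp =>
          acc ++ [if kp.1 % 2 == 0 then "Abs(" else ")", kp.2]) acc)
      |>.map String.toList).flatten)
      ++ (if (ps.length + (if k % 2 == 0 then 0 else 1)) % 2 == 1 then [')'] else [])
      = ((acc.map String.toList).flatten)
        ++ glue (ps.map String.toList) (!(k % 2 == 0)) := by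
  induction ps with
  | nil =>
    intro k acc
    by_cases he : k % 2 = 0 <;> simp [PySem.List.enumerate, glue, he]
  | cons p t ih =>
    intro k acc
    have hflip : ((k + 1) % 2 == 0) = !(k % 2 == 0) := by
      by_cases he : k % 2 = 0
      · have : (k + 1) % 2 = 1 := by omega
        simp [he, this]
      · have h1 : k % 2 = 1 := by omega
        have : (k + 1) % 2 = 0 := by omega
        simp [h1, this]
    have hcond : (((p :: t).length + (if k % 2 == 0 then 0 else 1)) % 2 == 1)
        = ((t.length + (if (k + 1) % 2 == 0 then 0 else 1)) % 2 == 1) := by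
      rw [hflip]
      have hx : ∀ (a b : Nat), a % 2 = b % 2 → ((a % 2 == 1) = (b % 2 == 1)) :=
        fun a b h => by rw [h]
      rcases (by omega : k % 2 = 0 ∨ k % 2 = 1) with he | he <;>
        simp only [he, List.length_cons, Int.reduceBEq, Bool.not_true, Bool.not_false,
          Bool.false_eq_true, if_true, if_false, ite_true, ite_false] <;>
        first
        | rfl
        | exact hx _ _ (by omega)
    simp only [PySem.List.enumerate, List.foldl_cons, hcond]
    rw [ih (k + 1) (acc ++ [if k % 2 == 0 then "Abs(" else ")", p])]
    rw [hflip]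
    by_cases he : k % 2 = 0 <;> simp [he, glue]

-- ===== VERDICT (by name: the statement is the Claim_ definition above) =====
theorem rewrite_abs_py_spec : Claim_equal_rewrite_abs_py := by
  intro expr _
  show rewrite_abs_py expr = rewrite_abs_py_alt expr
  apply String.toList_inj.mp
  -- A side
  have hA : (rewrite_abs_py expr).toList
      = (splitBar expr.toList).headD [] ++ glue ((splitBar expr.toList).tail) false := by
    unfold rewrite_abs_py
    rw [joinStrs_eq]
    rw [a_fold_eq expr.toList [] false]
    simpa using loopA_eq_glue expr.toList false
  -- B side
  have hsplit : (PySem.Chars.splitOn expr.toList "|".toList) = splitBar expr.toList := by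
    have : "|".toList = ['|'] := rfl
    rw [this, splitOn_bar]
  obtain ⟨p, ts, hps⟩ : ∃ p ts, splitBar expr.toList = p :: ts := by
    cases h : splitBar expr.toList with
    | nil => exact absurd h (splitBar_ne_nil expr.toList)
    | cons p ps => exact ⟨p, ps, rfl⟩
  have hB : (rewrite_abs_py_alt expr).toList = p ++ glue ts false := by
    unfold rewrite_abs_py_alt
    rw [hsplit, hps]
    have hb := b_fold_eq (((p :: ts).map String.ofList).drop 1) 0
      [((p :: ts).map String.ofList).headD ""]
    simp only [List.map_cons, List.headD_cons, List.drop_succ_cons, List.drop_zero,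
      List.length_map, Nat.add_zero, String.toList_ofList, List.map_map, Function.comp_def,
      List.map_id, List.map_id', List.map_id_fun, id_eq, show (((0:Int) % 2 == 0)) = true from rfl,
      Bool.not_true, if_true, ite_true, List.map_nil, List.flatten_cons, List.flatten_nil,
      List.append_nil] at hb
    by_cases hlen : (String.ofList p :: ts.map String.ofList).length % 2 == 0
    · have h1 : ts.length % 2 = 1 := by simp at hlen; omega
      rw [h1] at hb
      simp only [show ((1:Nat) == 1) = true from rfl, if_true, ite_true] at hb
      simp only [hlen, eq_self_iff_true, if_true, ite_true, joinStrs_eq, List.map_append,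
        List.flatten_append, List.map_cons, List.map_nil, List.flatten_cons, List.flatten_nil,
        List.append_nil, List.headD_cons, List.drop_succ_cons, List.drop_zero,
        show (")" : String).toList = [')'] from rfl]
      exact hb
    · have h1 : ts.length % 2 = 0 := by simp at hlen; omega
      rw [h1] at hb
      simp only [show ((0:Nat) == 1) = false from rfl, Bool.false_eq_true, if_false, ite_false,
        List.append_nil] at hb
      rw [Bool.not_eq_true] at hlen
      simp only [hlen, Bool.false_eq_true, if_false, ite_false, joinStrs_eq,
        List.headD_cons, List.drop_succ_cons, List.drop_zero, List.map_cons]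
      exact hb
  rw [hA, hB, hps]
  simp
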